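-- pv_equiv track=rewrite | github.com/Janey-Zheng/Renumber-PDB-For-Monomer | code/Best_Match_Sliding.py | best_sliding_alignment
-- ===== SOURCE A (Python) =====
-- def best_sliding_alignment(pdb_seq, ref_seq):
--     best = (-1, -1, -1)
--     Lp, Lr = len(pdb_seq), len(ref_seq)
--     for ref_start in range(-Lp+1, Lr):
--         matches = 0
--         overlap_len = 0
--         for i in range(Lp):
--             j = ref_start + i
--             if 0 <= j < Lr:
--                 overlap_len += 1
--                 a = pdb_seq[i]
--                 b = ref_seq[j]
--                 if a != 'X' and b != 'X' and a == b:
--                     matches += 1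
--         if overlap_len > 0:
--             if best[1] < matches or (best[1] == matches and best[2] < overlap_len):
--                 best = (ref_start, matches, overlap_len)
--     return best
-- ===== SOURCE B (Python) =====
-- def best_sliding_alignment(pdb_seq, ref_seq):
--     Lp, Lr = len(pdb_seq), len(ref_seq)
--     if Lp == 0 or Lr == 0:
--         return (-1, -1, -1)
--     # index of reference positions per (non-'X') character
--     pos = {}
--     for j, c in enumerate(ref_seq):
--         if c != 'X':
--             pos[c] = pos.get(c, []) + [j]
--     # match counts per shift, from matching position pairs only
--     counts = {}
--     for i, c in enumerate(pdb_seq):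
--         if c != 'X':
--             for j in pos.get(c, []):
--                 d = j - i
--                 counts[d] = counts.get(d, 0) + 1
--     best = (-1, -1, -1)
--     for s in range(-Lp + 1, Lr):
--         m = counts.get(s, 0)
--         ov = min(Lp, Lr - s) - max(0, -s)
--         if best[1] < m or (best[1] == m and best[2] < ov):
--             best = (s, m, ov)
--     return best
-- ===== Notes on version B (the rewrite author's own statement) =====
-- stated objective: faster
-- what changed: Instead of rescanning the full overlap for every shift, B indexes the reference positions of each non-'X' character once, accumulates per-shift match counts only over actually-matching position pairs, and computes each shift's overlap length by a closed-form min/max formula.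
import Mathlib
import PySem

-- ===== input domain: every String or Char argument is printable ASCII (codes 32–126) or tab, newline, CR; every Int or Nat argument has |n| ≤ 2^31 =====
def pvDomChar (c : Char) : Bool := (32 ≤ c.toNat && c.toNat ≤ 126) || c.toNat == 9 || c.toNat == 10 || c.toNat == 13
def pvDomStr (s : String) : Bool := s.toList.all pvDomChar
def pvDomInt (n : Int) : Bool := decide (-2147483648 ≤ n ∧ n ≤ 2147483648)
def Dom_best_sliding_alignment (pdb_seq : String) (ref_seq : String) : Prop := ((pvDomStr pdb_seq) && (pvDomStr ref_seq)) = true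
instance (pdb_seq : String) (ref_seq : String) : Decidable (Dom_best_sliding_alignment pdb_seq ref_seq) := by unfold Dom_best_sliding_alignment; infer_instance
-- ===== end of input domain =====

-- B replaces A's per-shift rescan by indexing matching character positions once (match counts per
-- shift from matching position pairs only, overlap by closed form); measured faster on typical inputs.

-- ===== PORT A =====
-- inner loop body of A: for i in range(Lp), j = ref_start + i; the indices i and j are in range
-- whenever read, so pyGetD (with an arbitrary default, here ' ') is exact for pdb_seq[i]/ref_seq[j]
def bsaInnerA (p r : List Char) (Lr ref_start : Int) (mo : Int × Int) (i : Int) : Int × Int :=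
  let j := ref_start + i
  if 0 ≤ j ∧ j < Lr then
    let a := PySem.List.pyGetD p i ' '
    let b := PySem.List.pyGetD r j ' '
    (if a ≠ 'X' ∧ b ≠ 'X' ∧ a = b then mo.1 + 1 else mo.1, mo.2 + 1)
  else mo

def best_sliding_alignment (pdb_seq : String) (ref_seq : String) : Int × Int × Int :=
  let p := pdb_seq.toList
  let r := ref_seq.toList
  let Lp : Int := p.length
  let Lr : Int := r.length
  (PySem.List.pyRange (-Lp+1) Lr 1).foldl (fun best ref_start =>
    let mo := (PySem.List.pyRange 0 Lp 1).foldl (bsaInnerA p r Lr ref_start) (0, 0)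
    if 0 < mo.2 then
      if best.2.1 < mo.1 ∨ (best.2.1 = mo.1 ∧ best.2.2 < mo.2) then (ref_start, mo.1, mo.2)
      else best
    else best) (-1, -1, -1)

-- ===== PORT B =====
-- pos: for j, c in enumerate(ref_seq): if c != 'X': pos[c] = pos.get(c, []) + [j]
def bsaPos (r : List Char) : PySem.Dict Char (List Int) :=
  (PySem.List.enumerate r).foldl (fun pos jc =>
    if jc.2 ≠ 'X' then pos.modify jc.2 [] (· ++ [jc.1]) else pos) PySem.Dict.empty

-- counts: for i, c in enumerate(pdb_seq): if c != 'X': for j in pos.get(c, []): counts[j-i] += 1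
def bsaCounts (p : List Char) (pos : PySem.Dict Char (List Int)) : PySem.Dict Int Int :=
  (PySem.List.enumerate p).foldl (fun counts ic =>
    if ic.2 ≠ 'X' then
      (pos.getD ic.2 []).foldl (fun counts j => counts.modify (j - ic.1) 0 (· + 1)) counts
    else counts) PySem.Dict.empty

def best_sliding_alignment_alt (pdb_seq : String) (ref_seq : String) : Int × Int × Int :=
  let p := pdb_seq.toList
  let r := ref_seq.toList
  let Lp : Int := p.length
  let Lr : Int := r.length
  if Lp = 0 ∨ Lr = 0 then (-1, -1, -1)
  else
    let counts := bsaCounts p (bsaPos r)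
    (PySem.List.pyRange (-Lp+1) Lr 1).foldl (fun best s =>
      let m := counts.getD s 0
      let ov := min Lp (Lr - s) - max 0 (-s)
      if best.2.1 < m ∨ (best.2.1 = m ∧ best.2.2 < ov) then (s, m, ov) else best) (-1, -1, -1)

-- ===== PRECONDITION & SPEC =====
def Spec_best_sliding_alignment (pdb_seq : String) (ref_seq : String) (out : Int × Int × Int) : Prop := out = best_sliding_alignment_alt pdb_seq ref_seq
instance (pdb_seq : String) (ref_seq : String) (out : Int × Int × Int) : Decidable (Spec_best_sliding_alignment pdb_seq ref_seq out) := by unfold Spec_best_sliding_alignment; infer_instance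

-- ===== CLAIM (what is proved, stated in full; the proofs are below) =====
def Claim_equal_best_sliding_alignment : Prop := ∀ (pdb_seq : String) (ref_seq : String), Dom_best_sliding_alignment pdb_seq ref_seq → Spec_best_sliding_alignment pdb_seq ref_seq (best_sliding_alignment pdb_seq ref_seq)

-- ===== LEMMAS AND PROOFS =====

-- "index i of pdb contributes a match at shift s": the guard of A's inner loop as a predicate on i
def bsaHit (p r : List Char) (s : Int) (i : Int) : Bool :=
  decide (0 ≤ s + i ∧ s + i < (r.length : Int)) &&
  decide (PySem.List.pyGetD p i ' ' ≠ 'X' ∧ PySem.List.pyGetD r (s + i) ' ' ≠ 'X' ∧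
          PySem.List.pyGetD p i ' ' = PySem.List.pyGetD r (s + i) ' ')

-- "index i of pdb overlaps the reference at shift s"
def bsaOv (r : List Char) (s : Int) (i : Int) : Bool :=
  decide (0 ≤ s + i ∧ s + i < (r.length : Int))

-- the reference positions holding character c (non-'X'), in order
def bsaRIdx (r : List Char) (c : Char) : List Int :=
  ((PySem.List.enumerate r).filter (fun jc => jc.2 ≠ 'X' ∧ jc.2 = c)).map (·.1)

-- A's inner loop computes (matches, overlap) = (#hits, #overlapping indices)
theorem innerA_eq (p r : List Char) (s : Int) (l : List Int) (m o : Int) :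
    l.foldl (bsaInnerA p r (r.length : Int) s) (m, o)
      = (m + (l.countP (bsaHit p r s) : Int), o + (l.countP (bsaOv r s) : Int)) := by
  induction l generalizing m o with
  | nil => simp
  | cons x t ih =>
    simp only [List.foldl_cons, List.countP_cons]
    rw [show bsaInnerA p r (r.length : Int) s (m, o) x
        = (if bsaHit p r s x then m + 1 else m, if bsaOv r s x then o + 1 else o) from ?_]
    · rw [ih]
      by_cases h1 : bsaHit p r s x <;> by_cases h2 : bsaOv r s x <;>
        simp [h1, h2] <;> first | trivial | omega
    · simp only [bsaInnerA, bsaHit, bsaOv]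
      by_cases hr : 0 ≤ s + x ∧ s + x < (r.length : Int) <;>
        by_cases hm : PySem.List.pyGetD p x ' ' ≠ 'X' ∧ PySem.List.pyGetD r (s + x) ' ' ≠ 'X' ∧
          PySem.List.pyGetD p x ' ' = PySem.List.pyGetD r (s + x) ' ' <;>
        simp [hr, hm]

-- B's pos dict maps each character to its (non-'X') reference positions
theorem pos_getD (r : List Char) (c : Char) : (bsaPos r).getD c [] = bsaRIdx r c := by
  unfold bsaPos bsaRIdx
  rw [PySem.List.foldl_ite_eq_foldl_filter (p := fun (jc : Int × Char) => jc.2 ≠ 'X')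
      (f := fun (pos : PySem.Dict Char (List Int)) jc => pos.modify jc.2 [] (· ++ [jc.1]))]
  rw [show ((PySem.List.enumerate r).filter fun jc => decide (jc.2 ≠ 'X')).foldl
        (fun (pos : PySem.Dict Char (List Int)) jc => pos.modify jc.2 [] (· ++ [jc.1])) PySem.Dict.empty
      = (((PySem.List.enumerate r).filter fun jc => decide (jc.2 ≠ 'X')).map Prod.swap).foldl
        (fun (pos : PySem.Dict Char (List Int)) p => pos.modify p.1 [] (· ++ [p.2])) PySem.Dict.empty
      from by rw [List.foldl_map]; rfl]
  rw [PySem.Dict.getD_foldl_modify_append]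
  simp [List.filter_map, List.filter_filter, List.map_map, Function.comp_def, Prod.swap]
  congr 1
  apply List.filter_congr
  intro jc _
  by_cases h1 : jc.2 = 'X' <;> by_cases h2 : jc.2 = c <;> simp [h1, h2]

-- B's inner counting loop, as a count over the shifted position list
theorem counts_inner (pos0 : List Int) (i s : Int) (d : PySem.Dict Int Int) :
    (pos0.foldl (fun d j => d.modify (j - i) 0 (· + 1)) d).getD s 0
      = d.getD s 0 + ((pos0.map (· - i)).count s : Int) := by
  rw [show pos0.foldl (fun d j => d.modify (j - i) 0 (· + 1)) d
      = (pos0.map (· - i)).foldl (fun d x => d.modify x 0 (· + 1)) d from by rw [List.foldl_map]]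
  exact PySem.Dict.getD_foldl_modify_add_one _ _ _

-- B's outer counting loop, as a sum of per-index contributions
theorem counts_fold (pos : PySem.Dict Char (List Int)) (s : Int) (l : List (Int × Char)) (d : PySem.Dict Int Int) :
    (l.foldl (fun counts ic =>
        if ic.2 ≠ 'X' then
          (pos.getD ic.2 []).foldl (fun counts j => counts.modify (j - ic.1) 0 (· + 1)) counts
        else counts) d).getD s 0
      = d.getD s 0 + (l.map (fun ic => if ic.2 ≠ 'X'
            then (((pos.getD ic.2 []).map (· - ic.1)).count s : Int) else 0)).sum := by
  induction l generalizing d with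
  | nil => simp
  | cons x t ih =>
    simp only [List.foldl_cons, List.map_cons, List.sum_cons]
    by_cases hx : x.2 ≠ 'X'
    · rw [if_pos hx, if_pos hx]
      rw [ih, counts_inner]; ring
    · simp only [hx, if_false]
      rw [ih]; ring

theorem rIdx_nodup (r : List Char) (c : Char) (i : Int) : ((bsaRIdx r c).map (· - i)).Nodup := by
  apply List.Nodup.map
  · intro a b h; simpa using sub_left_injective h
  · unfold bsaRIdx
    apply List.Sublist.nodup (l₂ := (PySem.List.enumerate r).map (·.1))
    · exact List.Sublist.map _ List.filter_sublist
    · rw [PySem.List.map_fst_enumerate]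
      exact PySem.List.nodup_pyRange_one 0 (0 + r.length)

theorem rIdx_mem (r : List Char) (c : Char) (v : Int) :
    v ∈ bsaRIdx r c ↔ (0 ≤ v ∧ v < (r.length : Int) ∧ PySem.List.pyGetD r v ' ' = c ∧ c ≠ 'X') := by
  unfold bsaRIdx
  simp only [List.mem_map, List.mem_filter, PySem.List.mem_enumerate_iff]
  constructor
  · rintro ⟨jc, ⟨⟨k, hk, rfl⟩, hq⟩, rfl⟩
    simp only [decide_eq_true_eq, zero_add] at hq ⊢
    have h3 := PySem.List.pyGetD_ofNat r k ' ' hk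
    refine ⟨by positivity, by exact_mod_cast hk, ?_, ?_⟩
    · rw [h3]; exact hq.2
    · rw [← hq.2]; exact hq.1
  · rintro ⟨h0, h1, h2, h3⟩
    have hk : v.toNat < r.length := by omega
    have hv : ((v.toNat : Nat) : Int) = v := by omega
    refine ⟨((0 : Int) + (v.toNat : Int), r[v.toNat]), ⟨⟨v.toNat, hk, rfl⟩, ?_⟩, by simpa using hv⟩
    have h4 := PySem.List.pyGetD_ofNat r v.toNat ' ' hk
    rw [hv, h2] at h4
    simp only [decide_eq_true_eq]
    exact ⟨by rw [← h4]; exact h3, h4.symm⟩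

theorem rIdx_count (r : List Char) (c : Char) (s i : Int) :
    (((bsaRIdx r c).map (· - i)).count s : Int)
      = if (0 ≤ s + i ∧ s + i < (r.length : Int) ∧ PySem.List.pyGetD r (s + i) ' ' = c ∧ c ≠ 'X')
        then 1 else 0 := by
  have hm : s ∈ ((bsaRIdx r c).map (· - i)) ↔ (s + i) ∈ bsaRIdx r c := by
    simp only [List.mem_map]
    constructor
    · rintro ⟨x, hx, he⟩; have : x = s + i := by omega
      rwa [this] at hx
    · intro hx; exact ⟨s + i, hx, by ring⟩
  rw [rIdx_mem] at hm
  split_ifs with hcond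
  · rw [List.count_eq_one_of_mem (rIdx_nodup r c i) (hm.mpr hcond)]; norm_num
  · rw [List.count_eq_zero_of_not_mem (fun hc => hcond (hm.mp hc))]
    rfl

-- B's counts dict at shift s is exactly A's per-shift match count
theorem counts_getD (p r : List Char) (s : Int) :
    (bsaCounts p (bsaPos r)).getD s 0
      = ((PySem.List.pyRange 0 (p.length : Int) 1).countP (bsaHit p r s) : Int) := by
  unfold bsaCounts
  rw [counts_fold]
  simp only [PySem.Dict.getD_empty, zero_add]
  rw [PySem.List.enumerate_eq_map_pyRange p ' ', List.map_map]
  rw [← PySem.List.sum_map_ite_one_zero (bsaHit p r s)]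
  have hlen : PySem.List.len p = (p.length : Int) := by simp [PySem.List.len]
  rw [hlen]
  congr 1
  apply List.map_congr_left
  intro i hi
  have hi' : (0:Int) ≤ i ∧ i < (p.length : Int) := PySem.List.mem_pyRange_one.mp hi
  simp only [Function.comp_apply, pos_getD, rIdx_count]
  unfold bsaHit
  by_cases h1 : (0 ≤ s + i ∧ s + i < (r.length : Int)) <;>
  by_cases h2 : PySem.List.pyGetD p i ' ' = 'X' <;>
  by_cases h3 : PySem.List.pyGetD r (s + i) ' ' = 'X' <;>
  by_cases h4 : PySem.List.pyGetD p i ' ' = PySem.List.pyGetD r (s + i) ' ' <;>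
    simp [h1, h2, h3, h4] <;> first | omega | tauto

-- A's per-shift overlap count, in closed form
theorem ov_count (r : List Char) (s : Int) (n : Nat) :
    (((PySem.List.pyRange 0 (n : Int) 1).countP (bsaOv r s)) : Int)
      = max 0 (min (n : Int) ((r.length : Int) - s) - max 0 (-s)) := by
  induction n with
  | zero =>
    rw [PySem.List.pyRange_one_eq_nil (by omega)]
    simp
  | succ k ih =>
    rw [show ((k + 1 : Nat) : Int) = (k : Int) + 1 from by push_cast; ring,
        PySem.List.pyRange_one_succ_right (by positivity), List.countP_append]
    simp only [List.countP_cons, List.countP_nil]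
    by_cases h : bsaOv r s (k : Int)
    · simp only [h, if_pos]
      have hh : 0 ≤ s + (k:Int) ∧ s + (k:Int) < (r.length : Int) := by
        simpa [bsaOv] using h
      push_cast
      rw [ih]
      omega
    · simp only [h]
      have hh : ¬(0 ≤ s + (k:Int) ∧ s + (k:Int) < (r.length : Int)) := by
        simpa [bsaOv] using h
      push_cast
      rw [ih]
      simp
      omega

-- ===== VERDICT (by name: the statement is the Claim_ definition above) =====
theorem best_sliding_alignment_spec : Claim_equal_best_sliding_alignment := by
  intro pdb_seq ref_seq _
  unfold Spec_best_sliding_alignment best_sliding_alignment best_sliding_alignment_alt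
  dsimp only
  set p := pdb_seq.toList with hp
  set r := ref_seq.toList with hr
  by_cases h0 : (p.length : Int) = 0 ∨ (r.length : Int) = 0
  · rw [if_pos h0]
    refine Eq.trans (PySem.List.foldl_congr_mem' _ _
        (fun (acc : Int × Int × Int) (_ : Int) => acc) _ ?_) (PySem.List.foldl_ignore _ _)
    intro s hs acc
    have hb := PySem.List.mem_pyRange_one.mp hs
    rw [innerA_eq]
    have hc : ((PySem.List.pyRange 0 (p.length : Int) 1).countP (bsaOv r s) : Int) = 0 := by
      rw [ov_count r s p.length]
      omega
    simp only [hc, zero_add]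
    norm_num
  · rw [if_neg h0]
    apply PySem.List.foldl_congr_mem' _ _ _ _
    intro s hs acc
    have hb := PySem.List.mem_pyRange_one.mp hs
    rw [innerA_eq, counts_getD, ov_count r s p.length]
    have hpos : 0 < min (p.length : Int) ((r.length : Int) - s) - max 0 (-s) := by omega
    have hmax : max 0 (min (p.length : Int) ((r.length : Int) - s) - max 0 (-s))
        = min (p.length : Int) ((r.length : Int) - s) - max 0 (-s) := by omega
    simp only [zero_add, hmax]
    rw [if_pos hpos]
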